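-- pv_equiv track=rewrite | github.com/Innoviox/zarf | hooks.py | extract_hooks
-- ===== SOURCE A (Python) =====
-- def extract_hooks(words):
--     bases = {}  # word : [front, back]
--     for w in words:
--         fstem, bstem = w[1:], w[:-1]
--         if fstem in bases:
--             bases[fstem][0].append(w[0])
--         else:
--             bases[fstem] = [[w[0]], []]
--
--         if bstem in bases:
--             bases[bstem][1].append(w[-1])
--         else:
--             bases[bstem] = [[], [w[-1]]]
--     return bases
-- ===== SOURCE B (Python) =====
-- def extract_hooks(words):
--     words = list(words)
--     front = {}
--     for w in words:
--         front.setdefault(w[1:], []).append(w[0])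
--     back = {}
--     for w in words:
--         back.setdefault(w[:-1], []).append(w[-1])
--     stems = []
--     for w in words:
--         stems.append(w[1:])
--         stems.append(w[:-1])
--     return {k: [front.get(k, []), back.get(k, [])] for k in dict.fromkeys(stems)}
-- ===== Notes on version B (the rewrite author's own statement) =====
-- stated objective: alternative
-- what changed: A builds one dict in a single interleaved loop with four membership/branch cases; B runs three independent passes (a front-hook grouping dict, a back-hook grouping dict, an ordered list of stems) and merges them into the result dict at the end.
import Mathlib
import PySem

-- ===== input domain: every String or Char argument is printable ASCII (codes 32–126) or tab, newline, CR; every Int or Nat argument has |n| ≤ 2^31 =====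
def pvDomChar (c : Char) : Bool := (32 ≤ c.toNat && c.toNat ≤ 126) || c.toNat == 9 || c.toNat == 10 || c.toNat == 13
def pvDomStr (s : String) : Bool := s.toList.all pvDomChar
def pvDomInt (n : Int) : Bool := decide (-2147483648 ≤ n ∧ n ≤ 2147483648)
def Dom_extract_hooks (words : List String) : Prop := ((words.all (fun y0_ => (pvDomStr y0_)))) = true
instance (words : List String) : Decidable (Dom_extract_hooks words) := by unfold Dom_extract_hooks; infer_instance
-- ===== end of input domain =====

-- B replaces A's single interleaved dict-building loop by three independent passes
-- (a front-hook grouping dict, a back-hook grouping dict, an ordered key list) merged at the end;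
-- objective: simpler decomposition, same asymptotic cost.

-- ===== PORT A =====
-- Python's in-place `v[0].append(x)` / `v[1].append(x)` on the stored two-element list,
-- ported as building the updated list (exact for every value A stores, which always has 2 elements).
def pvAppendAt0 (v : List (List String)) (x : String) : List (List String) :=
  match v with
  | f :: r => (f ++ [x]) :: r
  | [] => []

def pvAppendAt1 (v : List (List String)) (x : String) : List (List String) :=
  match v with
  | f :: b :: r => f :: (b ++ [x]) :: r
  | v => v

-- the body of A's `for w in words` loop
def pvStepA (bases : PySem.Dict String (List (List String))) (w : String) :
    PySem.Dict String (List (List String)) :=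
  let fstem := PySem.Str.slice w (some 1) none
  let bstem := PySem.Str.slice w none (some (-1))
  let bases :=
    if bases.contains fstem then
      match PySem.Str.pyGet? w 0 with   -- w[0]; none = IndexError, excluded by Pre_
      | some c => bases.insert fstem (pvAppendAt0 (bases.getD fstem []) (String.ofList [c]))
      | none => bases
    else
      match PySem.Str.pyGet? w 0 with
      | some c => bases.insert fstem [[String.ofList [c]], []]
      | none => bases
  if bases.contains bstem then
    match PySem.Str.pyGet? w (-1) with  -- w[-1]; none = IndexError, excluded by Pre_
    | some c => bases.insert bstem (pvAppendAt1 (bases.getD bstem []) (String.ofList [c]))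
    | none => bases
  else
    match PySem.Str.pyGet? w (-1) with
    | some c => bases.insert bstem [[], [String.ofList [c]]]
    | none => bases

def extract_hooks (words : List String) : List (String × List (List String)) :=
  (words.foldl pvStepA PySem.Dict.empty).items

-- ===== PORT B =====
-- front.setdefault(w[1:], []).append(w[0])  ==  front[w[1:]] = front.get(w[1:], []) + [w[0]]
def pvFrontStep (d : PySem.Dict String (List String)) (w : String) :
    PySem.Dict String (List String) :=
  match PySem.Str.pyGet? w 0 with
  | some c => d.modify (PySem.Str.slice w (some 1) none) [] (fun v => v ++ [String.ofList [c]])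
  | none => d   -- IndexError, excluded by Pre_

-- back.setdefault(w[:-1], []).append(w[-1])
def pvBackStep (d : PySem.Dict String (List String)) (w : String) :
    PySem.Dict String (List String) :=
  match PySem.Str.pyGet? w (-1) with
  | some c => d.modify (PySem.Str.slice w none (some (-1))) [] (fun v => v ++ [String.ofList [c]])
  | none => d

def extract_hooks_alt (words : List String) : List (String × List (List String)) :=
  let front := words.foldl pvFrontStep PySem.Dict.empty
  let back := words.foldl pvBackStep PySem.Dict.empty
  let stems := words.foldl (fun acc w =>
    acc ++ [PySem.Str.slice w (some 1) none, PySem.Str.slice w none (some (-1))]) []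
  (PySem.List.dedup stems).map (fun k => (k, [front.getD k [], back.getD k []]))

-- ===== PRECONDITION & SPEC =====
-- Pre_ excludes lists containing the empty string: there A (and B) raise IndexError at w[0].
def Pre_extract_hooks (words : List String) : Prop := ∀ w ∈ words, w ≠ ""
instance (words : List String) : Decidable (Pre_extract_hooks words) := by unfold Pre_extract_hooks; infer_instance
def pvWitness_extract_hooks : List String := ["at", "a", "cat"]

def Spec_extract_hooks (words : List String) (out : List (String × List (List String))) : Prop := out = extract_hooks_alt words
instance (words : List String) (out : List (String × List (List String))) : Decidable (Spec_extract_hooks words out) := by unfold Spec_extract_hooks; infer_instance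

-- ===== CLAIM (what is proved, stated in full; the proofs are below) =====
def Claim_equal_extract_hooks : Prop := ∀ (words : List String), Dom_extract_hooks words → Pre_extract_hooks words → Spec_extract_hooks words (extract_hooks words)

-- ===== LEMMAS AND PROOFS =====

-- proof-side abbreviations
def pvFs (w : String) : String := PySem.Str.slice w (some 1) none
def pvBs (w : String) : String := PySem.Str.slice w none (some (-1))
def pvFc (w : String) : String := String.ofList [(PySem.Str.pyGet? w 0).getD '?']
def pvBc (w : String) : String := String.ofList [(PySem.Str.pyGet? w (-1)).getD '?']

-- A's loop body with the IndexError matches resolved (equal to A's body on nonempty w)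
def pvCleanStep (bases : PySem.Dict String (List (List String))) (w : String) :
    PySem.Dict String (List (List String)) :=
  let d1 :=
    if bases.contains (pvFs w) then
      bases.insert (pvFs w) (pvAppendAt0 (bases.getD (pvFs w) []) (pvFc w))
    else
      bases.insert (pvFs w) [[pvFc w], []]
  if d1.contains (pvBs w) then
    d1.insert (pvBs w) (pvAppendAt1 (d1.getD (pvBs w) []) (pvBc w))
  else
    d1.insert (pvBs w) [[], [pvBc w]]

-- appending x to the list at key s, seen on the model (ks, f)
def pvF2 (f : String → List String) (s x : String) : String → List String :=
  fun k => f k ++ (if s == k then [x] else [])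

lemma pvOptChar_eq (o : Option Char) (h : o.isSome) : o = some (o.getD '?') := by
  cases o with
  | none => simp at h
  | some c => rfl

lemma pvGet0_nonempty (w : String) (h : w ≠ "") :
    PySem.Str.pyGet? w 0 = some ((PySem.Str.pyGet? w 0).getD '?') := by
  have h1 : w.toList ≠ [] := by simpa using h
  apply pvOptChar_eq
  cases hc : w.toList with
  | nil => exact absurd hc h1
  | cons a t =>
    simp [PySem.Str.pyGet?, PySem.Chars.pyGet?, PySem.List.pyGet?, PySem.List.pyIdx?, hc]

lemma pvGetNeg1_nonempty (w : String) (h : w ≠ "") :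
    PySem.Str.pyGet? w (-1) = some ((PySem.Str.pyGet? w (-1)).getD '?') := by
  have h1 : w.toList ≠ [] := by simpa using h
  apply pvOptChar_eq
  cases hc : w.toList with
  | nil => exact absurd hc h1
  | cons a t =>
    simp [PySem.Str.pyGet?, PySem.Chars.pyGet?, PySem.List.pyGet?, PySem.List.pyIdx?, hc]

-- the dict state of A's loop, abstracted as (key list, front map, back map)
def pvInv (d : PySem.Dict String (List (List String))) (ks : List String)
    (f b : String → List String) : Prop :=
  d.items = ks.map (fun k => (k, [f k, b k])) ∧ ks.Nodup ∧
  (∀ k, k ∉ ks → f k = [] ∧ b k = [])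

lemma pvKeys_of_inv (d : PySem.Dict String (List (List String))) (ks : List String)
    (f b : String → List String) (h : pvInv d ks f b) : d.keys = ks := by
  obtain ⟨hi, _, _⟩ := h
  simp [PySem.Dict.keys, hi, List.map_map, Function.comp_def]

lemma pvUpd0 (d : PySem.Dict String (List (List String))) (ks : List String)
    (f b : String → List String) (s x : String) (h : pvInv d ks f b) :
    pvInv (if d.contains s then d.insert s (pvAppendAt0 (d.getD s []) x)
           else d.insert s [[x], []])
      (PySem.Set.add ks s) (pvF2 f s x) b := by
  have hkeys : d.keys = ks := pvKeys_of_inv d ks f b h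
  obtain ⟨hi, hnd, hdef⟩ := h
  have hcont : d.contains s = decide (s ∈ ks) := by
    rw [PySem.Dict.contains_eq_decide_mem_keys, hkeys]
  by_cases hs : s ∈ ks
  · have hct : d.contains s = true := by rw [hcont]; simpa
    have hgd : d.getD s [] = [f s, b s] := by
      apply PySem.Dict.getD_of_mem_items d (v := [f s, b s])
      · rw [hi]; exact List.mem_map_of_mem hs
      · rw [hkeys]; exact hnd
    have hadd : PySem.Set.add ks s = ks := by
      simp [PySem.Set.add, hs]
    rw [if_pos hct, hadd]
    refine ⟨?_, hnd, ?_⟩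
    · rw [PySem.Dict.items_insert_of_contains d _ hct, hi, List.map_map]
      apply List.map_congr_left
      intro k hk
      by_cases hks : k = s
      · subst hks
        simp [pvF2, hgd, pvAppendAt0]
      · have h2 : (s == k) = false := by simpa using (Ne.symm hks)
        simp [pvF2, h2, hks]
    · intro k hk
      have h2 : (s == k) = false := by
        simp only [beq_eq_false_iff_ne, ne_eq]
        rintro rfl; exact hk hs
      exact ⟨by simp [pvF2, h2, (hdef k hk).1], (hdef k hk).2⟩
  · have hcf : d.contains s = false := by rw [hcont]; simpa
    have hadd : PySem.Set.add ks s = ks ++ [s] := by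
      simp [PySem.Set.add, hs]
    rw [if_neg (by simp [hcf]), hadd]
    refine ⟨?_, by simp [List.nodup_append, hnd]; exact fun a ha e => hs (e ▸ ha), ?_⟩
    · rw [PySem.Dict.items_insert_of_not_contains d _ hcf, hi, List.map_append]
      congr 1
      · apply List.map_congr_left
        intro k hk
        have h2 : (s == k) = false := by
          simp only [beq_eq_false_iff_ne, ne_eq]
          rintro rfl; exact hs hk
        simp [pvF2, h2]
      · simp [pvF2, (hdef s hs).1, (hdef s hs).2]
    · intro k hk
      simp only [List.mem_append, List.mem_singleton, not_or] at hk
      have h2 : (s == k) = false := by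
        simp only [beq_eq_false_iff_ne, ne_eq]
        rintro rfl; exact hk.2 rfl
      exact ⟨by simp [pvF2, h2, (hdef k hk.1).1], (hdef k hk.1).2⟩

lemma pvUpd1 (d : PySem.Dict String (List (List String))) (ks : List String)
    (f b : String → List String) (s x : String) (h : pvInv d ks f b) :
    pvInv (if d.contains s then d.insert s (pvAppendAt1 (d.getD s []) x)
           else d.insert s [[], [x]])
      (PySem.Set.add ks s) f (pvF2 b s x) := by
  have hkeys : d.keys = ks := pvKeys_of_inv d ks f b h
  obtain ⟨hi, hnd, hdef⟩ := h
  have hcont : d.contains s = decide (s ∈ ks) := by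
    rw [PySem.Dict.contains_eq_decide_mem_keys, hkeys]
  by_cases hs : s ∈ ks
  · have hct : d.contains s = true := by rw [hcont]; simpa
    have hgd : d.getD s [] = [f s, b s] := by
      apply PySem.Dict.getD_of_mem_items d (v := [f s, b s])
      · rw [hi]; exact List.mem_map_of_mem hs
      · rw [hkeys]; exact hnd
    have hadd : PySem.Set.add ks s = ks := by
      simp [PySem.Set.add, hs]
    rw [if_pos hct, hadd]
    refine ⟨?_, hnd, ?_⟩
    · rw [PySem.Dict.items_insert_of_contains d _ hct, hi, List.map_map]
      apply List.map_congr_left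
      intro k hk
      by_cases hks : k = s
      · subst hks
        simp [pvF2, hgd, pvAppendAt1]
      · have h2 : (s == k) = false := by simpa using (Ne.symm hks)
        simp [pvF2, h2, hks]
    · intro k hk
      have h2 : (s == k) = false := by
        simp only [beq_eq_false_iff_ne, ne_eq]
        rintro rfl; exact hk hs
      exact ⟨(hdef k hk).1, by simp [pvF2, h2, (hdef k hk).2]⟩
  · have hcf : d.contains s = false := by rw [hcont]; simpa
    have hadd : PySem.Set.add ks s = ks ++ [s] := by
      simp [PySem.Set.add, hs]
    rw [if_neg (by simp [hcf]), hadd]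
    refine ⟨?_, by simp [List.nodup_append, hnd]; exact fun a ha e => hs (e ▸ ha), ?_⟩
    · rw [PySem.Dict.items_insert_of_not_contains d _ hcf, hi, List.map_append]
      congr 1
      · apply List.map_congr_left
        intro k hk
        have h2 : (s == k) = false := by
          simp only [beq_eq_false_iff_ne, ne_eq]
          rintro rfl; exact hs hk
        simp [pvF2, h2]
      · simp [pvF2, (hdef s hs).1, (hdef s hs).2]
    · intro k hk
      simp only [List.mem_append, List.mem_singleton, not_or] at hk
      have h2 : (s == k) = false := by
        simp only [beq_eq_false_iff_ne, ne_eq]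
        rintro rfl; exact hk.2 rfl
      exact ⟨(hdef k hk.1).1, by simp [pvF2, h2, (hdef k hk.1).2]⟩

lemma pvFoldA (ws : List String) : ∀ (d : PySem.Dict String (List (List String)))
    (ks : List String) (f b : String → List String), pvInv d ks f b →
    (ws.foldl pvCleanStep d).items =
      (PySem.Set.update ks (ws.flatMap (fun w => [pvFs w, pvBs w]))).map
        (fun k => (k, [f k ++ (ws.filter (fun w => pvFs w == k)).map pvFc,
                       b k ++ (ws.filter (fun w => pvBs w == k)).map pvBc])) := by
  induction ws with
  | nil =>
    intro d ks f b h
    obtain ⟨hi, _, _⟩ := h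
    simpa [PySem.Set.update] using hi
  | cons w ws ih =>
    intro d ks f b h
    have h1 := pvUpd1 _ _ _ _ (pvBs w) (pvBc w) (pvUpd0 d ks f b (pvFs w) (pvFc w) h)
    have hstep : List.foldl pvCleanStep d (w :: ws) = List.foldl pvCleanStep (pvCleanStep d w) ws := rfl
    rw [hstep]
    have := ih _ _ _ _ h1
    rw [show pvCleanStep d w =
      (if (if d.contains (pvFs w) then d.insert (pvFs w) (pvAppendAt0 (d.getD (pvFs w) []) (pvFc w))
           else d.insert (pvFs w) [[pvFc w], []]).contains (pvBs w) then
        (if d.contains (pvFs w) then d.insert (pvFs w) (pvAppendAt0 (d.getD (pvFs w) []) (pvFc w))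
           else d.insert (pvFs w) [[pvFc w], []]).insert (pvBs w)
          (pvAppendAt1 ((if d.contains (pvFs w) then d.insert (pvFs w) (pvAppendAt0 (d.getD (pvFs w) []) (pvFc w))
           else d.insert (pvFs w) [[pvFc w], []]).getD (pvBs w) []) (pvBc w))
       else (if d.contains (pvFs w) then d.insert (pvFs w) (pvAppendAt0 (d.getD (pvFs w) []) (pvFc w))
           else d.insert (pvFs w) [[pvFc w], []]).insert (pvBs w) [[], [pvBc w]]) from rfl]
    rw [this]
    have hupd : PySem.Set.update ks ((w :: ws).flatMap (fun w => [pvFs w, pvBs w])) =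
        PySem.Set.update (PySem.Set.add (PySem.Set.add ks (pvFs w)) (pvBs w))
          (ws.flatMap (fun w => [pvFs w, pvBs w])) := rfl
    rw [hupd]
    apply List.map_congr_left
    intro k _
    have hf : pvF2 f (pvFs w) (pvFc w) k ++ (ws.filter (fun w' => pvFs w' == k)).map pvFc
        = f k ++ ((w :: ws).filter (fun w' => pvFs w' == k)).map pvFc := by
      by_cases hk : pvFs w == k
      · simp [pvF2, hk, List.append_assoc]
      · simp [pvF2, hk]
    have hb : pvF2 b (pvBs w) (pvBc w) k ++ (ws.filter (fun w' => pvBs w' == k)).map pvBc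
        = b k ++ ((w :: ws).filter (fun w' => pvBs w' == k)).map pvBc := by
      by_cases hk : pvBs w == k
      · simp [pvF2, hk, List.append_assoc]
      · simp [pvF2, hk]
    rw [hf, hb]

theorem extract_hooks_spec : Claim_equal_extract_hooks := by
  intro words _ hpre
  show extract_hooks words = extract_hooks_alt words
  -- A side: resolve the IndexError matches, then run the fold characterization
  have hA : extract_hooks words = (words.foldl pvCleanStep PySem.Dict.empty).items := by
    unfold extract_hooks
    congr 1
    apply PySem.List.foldl_congr_mem
    intro d w hw
    unfold pvStepA pvCleanStep
    rw [pvGet0_nonempty w (hpre w hw), pvGetNeg1_nonempty w (hpre w hw)]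
    rfl
  rw [hA, pvFoldA words PySem.Dict.empty [] (fun _ => []) (fun _ => [])
    ⟨rfl, List.nodup_nil, fun k _ => ⟨rfl, rfl⟩⟩]
  -- B side
  simp only [extract_hooks_alt]
  have hfront : words.foldl pvFrontStep PySem.Dict.empty
      = (words.map (fun w => (pvFs w, pvFc w))).foldl
          (fun d p => d.modify p.1 [] (fun v => v ++ [p.2])) PySem.Dict.empty := by
    rw [List.foldl_map]
    apply PySem.List.foldl_congr_mem
    intro d w hw
    unfold pvFrontStep
    rw [pvGet0_nonempty w (hpre w hw)]
    rfl
  have hback : words.foldl pvBackStep PySem.Dict.empty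
      = (words.map (fun w => (pvBs w, pvBc w))).foldl
          (fun d p => d.modify p.1 [] (fun v => v ++ [p.2])) PySem.Dict.empty := by
    rw [List.foldl_map]
    apply PySem.List.foldl_congr_mem
    intro d w hw
    unfold pvBackStep
    rw [pvGetNeg1_nonempty w (hpre w hw)]
    rfl
  simp only [hfront, hback]
  have hstems : words.foldl (fun acc w =>
      acc ++ [PySem.Str.slice w (some 1) none, PySem.Str.slice w none (some (-1))]) []
      = words.flatMap (fun w => [pvFs w, pvBs w]) := by
    simpa using PySem.List.foldl_append_eq_flatMap (fun w => [pvFs w, pvBs w]) words []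
  rw [hstems]
  rw [show PySem.List.dedup (words.flatMap (fun w => [pvFs w, pvBs w]))
      = PySem.Set.update [] (words.flatMap (fun w => [pvFs w, pvBs w])) from rfl]
  apply List.map_congr_left
  intro k _
  rw [PySem.Dict.getD_foldl_modify_append, PySem.Dict.getD_foldl_modify_append]
  simp [List.filter_map, List.map_map, Function.comp_def, pvFs, pvBs]
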